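-- pv_equiv track=rewrite | github.com/Lepotato82/genate-ai-WIP | agents/ui_analyzer.py | _first_color
-- ===== SOURCE A (Python) =====
-- def _first_color(tokens: dict[str, str], default: str) -> str:
--     def is_color(v: str) -> bool:
--         t = v.strip()
--         return t.startswith("#") or t.startswith("rgb") or t.startswith("hsl")
--
--     named = (
--         "yellow",
--         "blue",
--         "green",
--         "purple",
--         "teal",
--         "orange",
--         "pink",
--     )
--     for k, v in tokens.items():
--         if "brand" in k.lower() and isinstance(v, str) and is_color(v):
--             return v.strip()
--     for k, v in tokens.items():
--         if "accent" in k.lower() and isinstance(v, str) and is_color(v):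
--             return v.strip()
--     for k, v in tokens.items():
--         if "primary" in k.lower() and isinstance(v, str) and is_color(v):
--             return v.strip()
--     for k, v in tokens.items():
--         if (
--             k.startswith("--")
--             and len(k) > 2
--             and k[2:].split("-")[0] in named
--             and isinstance(v, str)
--             and is_color(v)
--         ):
--             return v.strip()
--     for v in tokens.values():
--         if isinstance(v, str) and is_color(v):
--             return v.strip()
--     return default
-- ===== SOURCE B (Python) =====
-- def _first_color(tokens: dict[str, str], default: str) -> str:
--     def is_color(v: str) -> bool:
--         t = v.strip()
--         return t.startswith("#") or t.startswith("rgb") or t.startswith("hsl")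
--
--     named = (
--         "yellow",
--         "blue",
--         "green",
--         "purple",
--         "teal",
--         "orange",
--         "pink",
--     )
--     brand = accent = primary = named_c = any_c = None
--     for k, v in tokens.items():
--         if brand is None and "brand" in k.lower() and isinstance(v, str) and is_color(v):
--             brand = v.strip()
--         if accent is None and "accent" in k.lower() and isinstance(v, str) and is_color(v):
--             accent = v.strip()
--         if primary is None and "primary" in k.lower() and isinstance(v, str) and is_color(v):
--             primary = v.strip()
--         if (
--             named_c is None
--             and k.startswith("--")
--             and len(k) > 2
--             and k[2:].split("-")[0] in named
--             and isinstance(v, str)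
--             and is_color(v)
--         ):
--             named_c = v.strip()
--         if any_c is None and isinstance(v, str) and is_color(v):
--             any_c = v.strip()
--     if brand is not None:
--         return brand
--     if accent is not None:
--         return accent
--     if primary is not None:
--         return primary
--     if named_c is not None:
--         return named_c
--     if any_c is not None:
--         return any_c
--     return default
-- ===== Notes on version B (the rewrite author's own statement) =====
-- stated objective: alternative
-- what changed: Five sequential scans of the token list (one per priority category) are replaced by a single pass that records the first match of each category in five independent slots and then picks the highest-priority non-empty slot.
import Mathlib
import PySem

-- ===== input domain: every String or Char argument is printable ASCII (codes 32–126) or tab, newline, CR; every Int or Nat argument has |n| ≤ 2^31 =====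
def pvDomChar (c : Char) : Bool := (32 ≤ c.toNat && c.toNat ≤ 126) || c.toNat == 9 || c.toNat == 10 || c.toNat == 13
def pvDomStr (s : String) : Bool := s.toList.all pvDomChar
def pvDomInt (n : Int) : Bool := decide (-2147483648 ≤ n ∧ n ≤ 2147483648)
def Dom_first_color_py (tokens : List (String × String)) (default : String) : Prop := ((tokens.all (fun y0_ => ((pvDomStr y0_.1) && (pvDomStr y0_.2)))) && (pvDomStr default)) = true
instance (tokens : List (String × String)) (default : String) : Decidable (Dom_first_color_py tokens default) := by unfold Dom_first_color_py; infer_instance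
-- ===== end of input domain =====

-- ===== PORT A =====
-- B differs from A by decomposition: one pass with five independent first-match slots
-- instead of five sequential scans of the token list.

-- is_color(v) (shared helper of both Pythons)
def pvIsColor (v : String) : Bool :=
  let t := PySem.Str.strip v
  PySem.Str.startswith t "#" || PySem.Str.startswith t "rgb" || PySem.Str.startswith t "hsl"

def pvNamed : List String := ["yellow", "blue", "green", "purple", "teal", "orange", "pink"]

-- the four keyed conditions and the catch-all condition, exactly as both Pythons test them
-- (isinstance(v, str) is always true under the type convention and is dropped)
def pvCondBrand (kv : String × String) : Bool :=
  PySem.Str.isIn "brand" (PySem.Str.lower kv.1) && pvIsColor kv.2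

def pvCondAccent (kv : String × String) : Bool :=
  PySem.Str.isIn "accent" (PySem.Str.lower kv.1) && pvIsColor kv.2

def pvCondPrimary (kv : String × String) : Bool :=
  PySem.Str.isIn "primary" (PySem.Str.lower kv.1) && pvIsColor kv.2

def pvCondNamed (kv : String × String) : Bool :=
  PySem.Str.startswith kv.1 "--" &&
  decide (2 < PySem.Str.len kv.1) &&
  (match PySem.Str.split? (PySem.Str.slice kv.1 (some 2) none) "-" with
   | some (w :: _) => pvNamed.contains w
   | _ => false) &&
  pvIsColor kv.2

def pvCondAny (kv : String × String) : Bool := pvIsColor kv.2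

-- one 'for … : if cond: return v.strip()' loop of A
def pvScanP (p : String × String → Bool) : List (String × String) → Option String
  | [] => none
  | kv :: rest => if p kv then some (PySem.Str.strip kv.2) else pvScanP p rest

def first_color_py (tokens : List (String × String)) (default : String) : String :=
  match pvScanP pvCondBrand tokens with
  | some r => r
  | none =>
  match pvScanP pvCondAccent tokens with
  | some r => r
  | none =>
  match pvScanP pvCondPrimary tokens with
  | some r => r
  | none =>
  match pvScanP pvCondNamed tokens with
  | some r => r
  | none =>
  match pvScanP pvCondAny tokens with
  | some r => r
  | none => default

-- ===== PORT B =====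
-- one slot: set to v.strip() the first time its condition holds
def pvSlot (p : String × String → Bool) (s : Option String) (kv : String × String) : Option String :=
  if s.isNone && p kv then some (PySem.Str.strip kv.2) else s

def pvStepB (st : Option String × Option String × Option String × Option String × Option String)
    (kv : String × String) :
    Option String × Option String × Option String × Option String × Option String :=
  (pvSlot pvCondBrand st.1 kv, pvSlot pvCondAccent st.2.1 kv, pvSlot pvCondPrimary st.2.2.1 kv,
   pvSlot pvCondNamed st.2.2.2.1 kv, pvSlot pvCondAny st.2.2.2.2 kv)

def first_color_py_alt (tokens : List (String × String)) (default : String) : String :=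
  let st := tokens.foldl pvStepB (none, none, none, none, none)
  match st.1 with
  | some r => r
  | none =>
  match st.2.1 with
  | some r => r
  | none =>
  match st.2.2.1 with
  | some r => r
  | none =>
  match st.2.2.2.1 with
  | some r => r
  | none =>
  match st.2.2.2.2 with
  | some r => r
  | none => default

-- ===== PRECONDITION & SPEC =====
def Spec_first_color_py (tokens : List (String × String)) (default : String) (out : String) : Prop := out = first_color_py_alt tokens default
instance (tokens : List (String × String)) (default : String) (out : String) : Decidable (Spec_first_color_py tokens default out) := by unfold Spec_first_color_py; infer_instance

-- ===== CLAIM (what is proved, stated in full; the proofs are below) =====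
def Claim_equal_first_color_py : Prop := ∀ (tokens : List (String × String)) (default : String), Dom_first_color_py tokens default → Spec_first_color_py tokens default (first_color_py tokens default)

-- ===== LEMMAS AND PROOFS =====

-- folding one slot over the list is the scan, unless the slot is already set
theorem pvSlot_foldl (p : String × String → Bool) (l : List (String × String)) (s : Option String) :
    l.foldl (pvSlot p) s = match s with | some a => some a | none => pvScanP p l := by
  induction l generalizing s with
  | nil => cases s <;> simp [pvScanP]
  | cons kv t ih =>
    cases s with
    | some a => simp [List.foldl_cons, pvSlot, ih]
    | none =>
      simp only [List.foldl_cons, pvSlot, Option.isNone_none, Bool.true_and, pvScanP]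
      by_cases h : p kv = true <;> simp [h, ih]

-- the 5-tuple fold is the tuple of the five independent slot folds
theorem pvStepB_foldl (l : List (String × String))
    (s1 s2 s3 s4 s5 : Option String) :
    l.foldl pvStepB (s1, s2, s3, s4, s5) =
      (l.foldl (pvSlot pvCondBrand) s1, l.foldl (pvSlot pvCondAccent) s2,
       l.foldl (pvSlot pvCondPrimary) s3, l.foldl (pvSlot pvCondNamed) s4,
       l.foldl (pvSlot pvCondAny) s5) := by
  induction l generalizing s1 s2 s3 s4 s5 with
  | nil => rfl
  | cons kv t ih => simp [List.foldl_cons, pvStepB, ih]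

-- ===== VERDICT (by name: the statement is the Claim_ definition above) =====
theorem first_color_py_spec : Claim_equal_first_color_py := by
  intro tokens default _
  unfold Spec_first_color_py first_color_py first_color_py_alt
  rw [pvStepB_foldl]
  simp only [pvSlot_foldl]
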